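-- pv_equiv track=rewrite | github.com/thob97/uni_fu_alp2 | u4/U4.py | get_Tree_Elements
-- ===== SOURCE A (Python) =====
-- def left(i):
--     return i*2
--
-- def right(i):
--     return i*2+1
--
-- def get_Tree_Elements(taskList,current):
--     xs = []
--     if (taskList[0]>= right(current) and taskList[0]>= left(current)):
--        return [left(current)] + get_Tree_Elements(taskList,(left(current)) ) + [right(current)] + get_Tree_Elements(taskList,(right(current)) )
--     elif(taskList[0]>= left(current)):
--        return [left(current)] + get_Tree_Elements(taskList,(left(current)) )
--     elif(taskList[0]>= right(current)):
--         [right(current)] + get_Tree_Elements(taskList,(right(current)) )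
--     else:
--         return xs
-- ===== SOURCE B (Python) =====
-- def get_Tree_Elements(taskList, current):
--     bound = taskList[0]
--     out = []
--     stack = [current]
--     while stack:
--         node = stack.pop()
--         if node != current:
--             out.append(node)
--         if 2 * node + 1 <= bound:
--             stack.append(2 * node + 1)
--         if 2 * node <= bound:
--             stack.append(2 * node)
--     return out
-- ===== Notes on version B (the rewrite author's own statement) =====
-- stated objective: alternative
-- what changed: Replaces A's call recursion (concatenating the four-way recursive case split) with an iterative preorder traversal over an explicit stack: pop a node, emit it unless it is the root, and push its right then left child when they are within taskList[0].
import Mathlib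
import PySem

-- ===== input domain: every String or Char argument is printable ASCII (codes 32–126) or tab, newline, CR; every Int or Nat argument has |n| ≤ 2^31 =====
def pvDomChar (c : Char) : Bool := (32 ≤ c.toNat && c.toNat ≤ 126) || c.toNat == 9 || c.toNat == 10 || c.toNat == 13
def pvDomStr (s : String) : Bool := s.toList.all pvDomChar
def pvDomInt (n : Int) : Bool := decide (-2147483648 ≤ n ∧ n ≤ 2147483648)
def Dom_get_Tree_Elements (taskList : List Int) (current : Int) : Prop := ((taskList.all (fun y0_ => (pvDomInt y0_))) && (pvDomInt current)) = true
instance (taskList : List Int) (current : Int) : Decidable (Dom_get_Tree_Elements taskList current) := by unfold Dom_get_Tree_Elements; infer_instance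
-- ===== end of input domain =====

-- B replaces A's call recursion by an iterative preorder traversal over an explicit stack
-- (objective: alternative decomposition, same asymptotic cost).

-- ===== PORT A =====
-- Python helpers left/right
def pyLeft (i : Int) : Int := i * 2
def pyRight (i : Int) : Int := i * 2 + 1

-- literal transliteration of A's recursion; `fuel` only makes it total in Lean
-- (the wrapper passes enough fuel for every input A returns on, see Pre_).
def goA (fuel : Nat) (taskList : List Int) (current : Int) : List Int :=
  match fuel with
  | 0 => []
  | fuel + 1 =>
    let bound := (PySem.List.pyGet? taskList 0).getD 0
    if bound ≥ pyRight current ∧ bound ≥ pyLeft current then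
      [pyLeft current] ++ goA fuel taskList (pyLeft current) ++
        [pyRight current] ++ goA fuel taskList (pyRight current)
    else if bound ≥ pyLeft current then
      [pyLeft current] ++ goA fuel taskList (pyLeft current)
    else if bound ≥ pyRight current then
      []  -- Python's third branch has no `return` (falls to None); it is unreachable since right > left
    else []

def get_Tree_Elements (taskList : List Int) (current : Int) : List Int :=
  -- fuel ((bound+1-current).toNat + 1) exceeds the recursion depth whenever A terminates
  goA (((PySem.List.pyGet? taskList 0).getD 0 + 1 - current).toNat + 1) taskList current

-- ===== PORT B =====
-- iteration count of B's while-loop, used as fuel to make the loop total in Lean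
def fsB (bound n : Int) : Nat :=
  if _h : 1 ≤ n then
    1 + (if 2 * n ≤ bound then fsB bound (2 * n) else 0) +
        (if 2 * n + 1 ≤ bound then fsB bound (2 * n + 1) else 0)
  else 1
termination_by (bound + 1 - n).toNat
decreasing_by all_goals omega

-- literal transliteration of B's while-loop (stack top = Python's list end)
def goB (fuel : Nat) (bound root : Int) (stack out : List Int) : List Int :=
  match fuel with
  | 0 => out
  | fuel + 1 =>
    match stack with
    | [] => out
    | node :: rest =>
      let out' := if node ≠ root then out ++ [node] else out
      let st1 := if 2 * node + 1 ≤ bound then (2 * node + 1) :: rest else rest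
      let st2 := if 2 * node ≤ bound then (2 * node) :: st1 else st1
      goB fuel bound root st2 out'

def get_Tree_Elements_alt (taskList : List Int) (current : Int) : List Int :=
  goB (fsB ((PySem.List.pyGet? taskList 0).getD 0) current)
      ((PySem.List.pyGet? taskList 0).getD 0) current [current] []

-- ===== PRECONDITION & SPEC =====
-- Pre_ excludes exactly the inputs where Python A raises: the empty list (IndexError on
-- taskList[0]) and the inputs where the recursion never terminates (RecursionError),
-- i.e. current ≤ 0 with taskList[0] ≥ 2*current.
def Pre_get_Tree_Elements (taskList : List Int) (current : Int) : Prop :=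
  taskList ≠ [] ∧ (1 ≤ current ∨ taskList.headI < 2 * current)
instance (taskList : List Int) (current : Int) : Decidable (Pre_get_Tree_Elements taskList current) := by
  unfold Pre_get_Tree_Elements; infer_instance

def pvWitness_get_Tree_Elements : List Int × Int := ([6, 3], 1)

def Spec_get_Tree_Elements (taskList : List Int) (current : Int) (out : List Int) : Prop := out = get_Tree_Elements_alt taskList current
instance (taskList : List Int) (current : Int) (out : List Int) : Decidable (Spec_get_Tree_Elements taskList current out) := by unfold Spec_get_Tree_Elements; infer_instance

-- ===== CLAIM (what is proved, stated in full; the proofs are below) =====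
def Claim_equal_get_Tree_Elements : Prop := ∀ (taskList : List Int) (current : Int), Dom_get_Tree_Elements taskList current → Pre_get_Tree_Elements taskList current → Spec_get_Tree_Elements taskList current (get_Tree_Elements taskList current)

-- ===== LEMMAS AND PROOFS =====

-- the common mathematical value: the preorder list of bounded strict descendants of n
def Tr (bound n : Int) : List Int :=
  if _h : 1 ≤ n then
    (if _h2 : 2 * n ≤ bound then 2 * n :: Tr bound (2 * n) else []) ++
    (if _h3 : 2 * n + 1 ≤ bound then (2 * n + 1) :: Tr bound (2 * n + 1) else [])
  else []
termination_by (bound + 1 - n).toNat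
decreasing_by all_goals omega

lemma goA_eq_Tr (fuel : Nat) : ∀ (taskList : List Int) (n : Int), 1 ≤ n →
    ((PySem.List.pyGet? taskList 0).getD 0 + 1 - n).toNat < fuel →
    goA fuel taskList n = Tr ((PySem.List.pyGet? taskList 0).getD 0) n := by
  induction fuel with
  | zero => intro _ _ _ h; omega
  | succ fuel ih =>
    intro taskList n hn hf
    set b := (PySem.List.pyGet? taskList 0).getD 0 with hb
    rw [goA, Tr]
    simp only [pyLeft, pyRight, ← hb]
    rw [dif_pos hn]
    by_cases hr : b ≥ n * 2 + 1
    · have hl : b ≥ n * 2 := by omega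
      rw [if_pos ⟨hr, hl⟩, dif_pos (by omega : 2 * n ≤ b), dif_pos (by omega : 2 * n + 1 ≤ b)]
      rw [ih taskList (n * 2) (by omega) (by omega), ih taskList (n * 2 + 1) (by omega) (by omega)]
      have e1 : n * 2 = 2 * n := by ring
      have e2 : n * 2 + 1 = 2 * n + 1 := by omega
      simp [e1, ← hb]
    · rw [if_neg (by omega)]
      by_cases hl : b ≥ n * 2
      · rw [if_pos hl, dif_pos (by omega : 2 * n ≤ b), dif_neg (by omega : ¬ (2 * n + 1 ≤ b))]
        rw [ih taskList (n * 2) (by omega) (by omega)]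
        have e1 : n * 2 = 2 * n := by ring
        simp [e1, ← hb]
      · rw [if_neg hl, if_neg (by omega), dif_neg (by omega : ¬ (2 * n ≤ b)),
            dif_neg (by omega : ¬ (2 * n + 1 ≤ b))]
        simp

lemma fsB_pos (bound n : Int) : 1 ≤ fsB bound n := by
  rw [fsB]; split <;> omega

lemma goB_eq (fuel : Nat) : ∀ (bound root : Int) (stack out : List Int),
    (∀ n ∈ stack, 1 ≤ n ∧ root ≤ n) →
    (stack.map (fsB bound)).sum ≤ fuel →
    goB fuel bound root stack out =
      out ++ stack.flatMap (fun n => (if n ≠ root then [n] else []) ++ Tr bound n) := by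
  induction fuel with
  | zero =>
    intro bound root stack out hinv hf
    cases stack with
    | nil => simp [goB]
    | cons node rest =>
      exfalso
      have := fsB_pos bound node
      simp at hf; omega
  | succ fuel ih =>
    intro bound root stack out hinv hf
    cases stack with
    | nil => simp [goB]
    | cons node rest =>
      have hn1 : 1 ≤ node := (hinv node (by simp)).1
      have hnr : root ≤ node := (hinv node (by simp)).2
      have hrest : ∀ n ∈ rest, 1 ≤ n ∧ root ≤ n := fun n h => hinv n (List.mem_cons_of_mem _ h)
      have hFnode : fsB bound node =
          1 + (if 2 * node ≤ bound then fsB bound (2 * node) else 0) +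
              (if 2 * node + 1 ≤ bound then fsB bound (2 * node + 1) else 0) := by
        rw [fsB, dif_pos hn1]
      have hTr : Tr bound node =
          (if 2 * node ≤ bound then 2 * node :: Tr bound (2 * node) else []) ++
          (if 2 * node + 1 ≤ bound then (2 * node + 1) :: Tr bound (2 * node + 1) else []) := by
        rw [Tr, dif_pos hn1]
        by_cases h2 : 2 * node ≤ bound <;> by_cases h3 : 2 * node + 1 ≤ bound <;>
          simp [h2, h3]
      have hsum : fsB bound node + (rest.map (fsB bound)).sum ≤ fuel + 1 := by
        simpa using hf
      have hchildL : 2 * node ≠ root := by omega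
      have hchildR : 2 * node + 1 ≠ root := by omega
      by_cases hL : 2 * node ≤ bound <;> by_cases hR : 2 * node + 1 ≤ bound
      · -- both children pushed
        simp only [goB, if_pos hL, if_pos hR]
        rw [ih bound root (2 * node :: (2 * node + 1) :: rest) _
            (by intro n hmem
                simp only [List.mem_cons] at hmem
                rcases hmem with h | h | h
                · omega
                · omega
                · exact hrest n h)
            (by rw [if_pos hL, if_pos hR] at hFnode
                simp only [List.map_cons, List.sum_cons]; omega)]
        by_cases hroot : node = root
        · subst hroot
          simp [hTr, hL, hR, hchildL, hchildR, List.append_assoc]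
        · simp [hTr, hL, hR, hchildL, hchildR, hroot, List.append_assoc]
      · -- only left child pushed
        simp only [goB, if_pos hL, if_neg hR]
        rw [ih bound root (2 * node :: rest) _
            (by intro n hmem
                simp only [List.mem_cons] at hmem
                rcases hmem with h | h
                · omega
                · exact hrest n h)
            (by rw [if_pos hL, if_neg hR] at hFnode
                simp only [List.map_cons, List.sum_cons]; omega)]
        by_cases hroot : node = root
        · subst hroot
          simp [hTr, hL, hR, hchildL]
        · simp [hTr, hL, hR, hchildL, hroot, List.append_assoc]
      · -- only right child pushed (impossible arithmetically, but provable uniformly)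
        simp only [goB, if_neg hL, if_pos hR]
        rw [ih bound root ((2 * node + 1) :: rest) _
            (by intro n hmem
                simp only [List.mem_cons] at hmem
                rcases hmem with h | h
                · omega
                · exact hrest n h)
            (by rw [if_neg hL, if_pos hR] at hFnode
                simp only [List.map_cons, List.sum_cons]; omega)]
        by_cases hroot : node = root
        · subst hroot
          simp [hTr, hL, hR, hchildR]
        · simp [hTr, hL, hR, hchildR, hroot, List.append_assoc]
      · -- no child pushed
        simp only [goB, if_neg hL, if_neg hR]
        rw [ih bound root rest _ hrest
            (by have := fsB_pos bound node; omega)]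
        by_cases hroot : node = root
        · subst hroot
          simp [hTr, hL, hR]
        · simp [hTr, hL, hR, hroot, List.append_assoc]

-- ===== VERDICT (by name: the statement is the Claim_ definition above) =====
theorem get_Tree_Elements_spec : Claim_equal_get_Tree_Elements := by
  intro taskList current _ hpre
  obtain ⟨hne, hcase⟩ := hpre
  unfold Spec_get_Tree_Elements get_Tree_Elements get_Tree_Elements_alt
  set b := (PySem.List.pyGet? taskList 0).getD 0 with hb
  have hhead : taskList.headI = b := by
    cases taskList with
    | nil => exact absurd rfl hne
    | cons x xs => simp [hb]
  by_cases hc : 1 ≤ current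
  · rw [goA_eq_Tr _ taskList current hc (by omega), ← hb]
    rw [goB_eq _ b current [current] [] (by intro n h; simp at h; omega)
        (by simp)]
    simp
  · -- current ≤ 0 and b < 2*current: both return []
    have hblt : b < 2 * current := by rw [hhead] at hcase; omega
    have hA : goA ((b + 1 - current).toNat + 1) taskList current = [] := by
      rw [goA]
      simp only [pyLeft, pyRight, ← hb]
      rw [if_neg (by omega), if_neg (by omega), if_neg (by omega)]
    have hB : fsB b current = 1 := by rw [fsB, dif_neg hc]
    rw [hA, hB, goB]
    simp only [if_neg (by omega : ¬ (2 * current + 1 ≤ b)),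
               if_neg (by omega : ¬ (2 * current ≤ b))]
    rw [goB]
    simp
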